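-- pv_equiv track=rewrite | github.com/HoeYeon/strands-agent-with-streamlit-sample | bird-benchmark/scripts/csv_to_markdown.py | generate_markdown
-- ===== SOURCE A (Python) =====
-- def generate_markdown(
--     table_name: str,
--     database_name: str,
--     columns: list[dict]
-- ) -> str:
--     """컬럼 정보를 Markdown 형식으로 변환합니다."""
--
--     lines = []
--
--     # 헤더
--     lines.append(f"# Table: {table_name}")
--     lines.append(f"")
--     lines.append(f"**Database**: {database_name}")
--     lines.append(f"")
--
--     # 컬럼 테이블
--     lines.append("## Columns")
--     lines.append("")
--     lines.append("| Column | Alias | Type | Description |")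
--     lines.append("|--------|-------|------|-------------|")
--
--     business_logic = []
--
--     for col in columns:
--         # original_column_name이 실제 DB 컬럼명
--         original_name = col['original_name']
--         # column_name은 별칭 (없거나 원본과 같으면 빈칸)
--         alias = col['column_name'] if col['column_name'] and col['column_name'] != original_name else ''
--         data_type = col['data_type'] if col['data_type'] else '-'
--         description = col['description'] if col['description'] else '-'
--
--         # 테이블 내 파이프 문자 이스케이프
--         description = description.replace('|', '\\|')
--         alias = alias.replace('|', '\\|')
--
--         lines.append(f"| {original_name} | {alias} | {data_type} | {description} |")
--
--         # value_description이 있고 "NOT USEFUL"이 아니면 비즈니스 로직에 추가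
--         if col['value_description'] and 'NOT USEFUL' not in col['value_description'].upper():
--             # 비즈니스 로직에서는 alias가 있으면 함께 표시
--             display_name = f"{original_name} ({alias})" if alias else original_name
--             business_logic.append({
--                 'column': display_name,
--                 'logic': col['value_description']
--             })
--
--     # 비즈니스 로직 섹션
--     if business_logic:
--         lines.append("")
--         lines.append("## Business Logic & Value Descriptions")
--         lines.append("")
--
--         for item in business_logic:
--             # 멀티라인 처리: 줄바꿈을 유지하면서 들여쓰기
--             logic_text = item['logic'].strip()
--             # 줄바꿈을 bullet point 하위 항목으로 변환
--             logic_lines = logic_text.split('\n')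
--
--             lines.append(f"### {item['column']}")
--             lines.append("")
--             for logic_line in logic_lines:
--                 logic_line = logic_line.strip()
--                 if logic_line:
--                     lines.append(f"- {logic_line}")
--             lines.append("")
--
--     return '\n'.join(lines)
-- ===== SOURCE B (Python) =====
-- def _alias(col):
--     original = col['original_name']
--     name = col['column_name']
--     a = name if name and name != original else ''
--     return a.replace('|', '\\|')
--
--
-- def _row(col):
--     data_type = col['data_type'] if col['data_type'] else '-'
--     description = (col['description'] if col['description'] else '-').replace('|', '\\|')
--     return f"| {col['original_name']} | {_alias(col)} | {data_type} | {description} |"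
--
--
-- def _qualifies(col):
--     vd = col['value_description']
--     return bool(vd) and 'NOT USEFUL' not in vd.upper()
--
--
-- def _section(col):
--     a = _alias(col)
--     display = f"{col['original_name']} ({a})" if a else f"{col['original_name']}"
--     stripped = [line.strip() for line in col['value_description'].strip().split('\n')]
--     bullets = [f"- {line}" for line in stripped if line]
--     return [f"### {display}", ""] + bullets + [""]
--
--
-- def generate_markdown(table_name, database_name, columns):
--     lines = [
--         f"# Table: {table_name}", "",
--         f"**Database**: {database_name}", "",
--         "## Columns", "",
--         "| Column | Alias | Type | Description |",
--         "|--------|-------|------|-------------|",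
--     ]
--     lines += [_row(col) for col in columns]
--     if any(_qualifies(col) for col in columns):
--         lines += ["", "## Business Logic & Value Descriptions", ""]
--         for col in columns:
--             if _qualifies(col):
--                 lines += _section(col)
--     return '\n'.join(lines)
-- ===== Notes on version B (the rewrite author's own statement) =====
-- stated objective: simpler
-- what changed: Replaces A's single loop that interleaves row emission with accumulating an intermediate business_logic list (plus a second loop over that list) by two independent passes over columns: a map producing the table rows and an any()-gated filter pass emitting each business-logic section directly, dropping the intermediate list.
import Mathlib
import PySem

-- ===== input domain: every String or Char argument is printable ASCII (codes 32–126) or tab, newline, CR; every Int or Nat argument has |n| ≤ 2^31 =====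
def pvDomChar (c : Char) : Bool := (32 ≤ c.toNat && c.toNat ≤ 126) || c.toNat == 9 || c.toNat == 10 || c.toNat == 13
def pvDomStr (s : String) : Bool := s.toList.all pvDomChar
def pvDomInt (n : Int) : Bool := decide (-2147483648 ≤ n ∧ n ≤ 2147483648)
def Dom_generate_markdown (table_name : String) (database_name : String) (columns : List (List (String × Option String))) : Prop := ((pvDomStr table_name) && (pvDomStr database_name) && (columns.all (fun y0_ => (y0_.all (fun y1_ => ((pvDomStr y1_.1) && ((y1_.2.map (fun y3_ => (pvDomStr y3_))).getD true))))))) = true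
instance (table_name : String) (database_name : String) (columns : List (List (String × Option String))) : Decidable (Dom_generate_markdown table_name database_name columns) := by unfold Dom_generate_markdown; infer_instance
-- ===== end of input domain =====

-- B re-implements A by two independent passes over the columns (row pass, then an any-gated
-- business-logic pass) instead of one loop accumulating an intermediate business_logic list;
-- objective: simpler decomposition, same cost.

-- ===== PORT A =====
-- shared Python-semantics helpers (used by both ports, they are primitive lookups, not algorithm):
-- col[k] on a Python dict; the KeyError case (missing key) is excluded by Pre_, so getD none is unreachable inside Pre_
def pvGet (col : List (String × Option String)) (k : String) : Option String :=
  ((PySem.Dict.ofList col).get? k).getD none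
-- Python truthiness of a value that is None or a str
def pvTruthy : Option String → Bool
  | some s => !(s.toList == [])
  | none => false
-- f"{x}" where x is None or a str
def pvShow : Option String → List Char
  | none => "None".toList
  | some s => s.toList

-- the single loop of A: appends a table row to lines and conditionally an item to business_logic
-- (the Python dict {'column': …, 'logic': …} has the two fixed keys, represented as a pair)
def genALoop : List (List (String × Option String)) → List (List Char) → List (List Char × List Char) → List (List Char) × List (List Char × List Char)
  | [], lines, bl => (lines, bl)
  | col :: rest, lines, bl =>
    let onv := pvGet col "original_name"
    let cnv := pvGet col "column_name"
    let dtv := pvGet col "data_type"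
    let dev := pvGet col "description"
    let vdv := pvGet col "value_description"
    let alias0 : List Char := if pvTruthy cnv && !(cnv == onv) then (cnv.getD "").toList else []
    let dataType : List Char := if pvTruthy dtv then (dtv.getD "").toList else ['-']
    let descr0 : List Char := if pvTruthy dev then (dev.getD "").toList else ['-']
    let descr := PySem.Chars.replace descr0 ['|'] ['\\', '|']
    let aliasE := PySem.Chars.replace alias0 ['|'] ['\\', '|']
    let lines' := lines ++ ["| ".toList ++ pvShow onv ++ " | ".toList ++ aliasE ++ " | ".toList ++ dataType ++ " | ".toList ++ descr ++ " |".toList]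
    let bl' := if pvTruthy vdv && !(PySem.Chars.isIn "NOT USEFUL".toList (PySem.Chars.upper (vdv.getD "").toList)) then
        bl ++ [((if aliasE ≠ [] then pvShow onv ++ " (".toList ++ aliasE ++ [')'] else pvShow onv), (vdv.getD "").toList)]
      else bl
    genALoop rest lines' bl'

-- A's second loop over business_logic, with the inner loop over logic_lines as a foldl
def genABizLoop : List (List Char × List Char) → List (List Char) → List (List Char)
  | [], lines => lines
  | item :: rest, lines =>
    let logicText := PySem.Chars.strip item.2
    let logicLines := PySem.Chars.splitOn logicText ['\n']
    let lines' := lines ++ ["### ".toList ++ item.1, []]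
    let lines'' := logicLines.foldl (fun ls ll => let llS := PySem.Chars.strip ll; if llS ≠ [] then ls ++ ["- ".toList ++ llS] else ls) lines'
    genABizLoop rest (lines'' ++ [[]])

def generate_markdown (table_name : String) (database_name : String) (columns : List (List (String × Option String))) : String :=
  let lines : List (List Char) :=
    ["# Table: ".toList ++ table_name.toList, [],
     "**Database**: ".toList ++ database_name.toList, [],
     "## Columns".toList, [],
     "| Column | Alias | Type | Description |".toList,
     "|--------|-------|------|-------------|".toList]
  let res := genALoop columns lines []
  let lines' := if res.2 ≠ [] then genABizLoop res.2 (res.1 ++ [[], "## Business Logic & Value Descriptions".toList, []]) else res.1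
  String.ofList (PySem.Chars.join ['\n'] lines')

-- ===== PORT B =====
def pvAliasB (col : List (String × Option String)) : List Char :=
  let original := pvGet col "original_name"
  let name := pvGet col "column_name"
  let a : List Char := if pvTruthy name && !(name == original) then (name.getD "").toList else []
  PySem.Chars.replace a ['|'] ['\\', '|']

def pvRowB (col : List (String × Option String)) : List Char :=
  let dataType : List Char := if pvTruthy (pvGet col "data_type") then ((pvGet col "data_type").getD "").toList else ['-']
  let descr := PySem.Chars.replace (if pvTruthy (pvGet col "description") then ((pvGet col "description").getD "").toList else ['-']) ['|'] ['\\', '|']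
  "| ".toList ++ pvShow (pvGet col "original_name") ++ " | ".toList ++ pvAliasB col ++ " | ".toList ++ dataType ++ " | ".toList ++ descr ++ " |".toList

def pvQualB (col : List (String × Option String)) : Bool :=
  pvTruthy (pvGet col "value_description") &&
    !(PySem.Chars.isIn "NOT USEFUL".toList (PySem.Chars.upper (((pvGet col "value_description")).getD "").toList))

def pvSectionB (col : List (String × Option String)) : List (List Char) :=
  let a := pvAliasB col
  let display := if a ≠ [] then pvShow (pvGet col "original_name") ++ " (".toList ++ a ++ [')'] else pvShow (pvGet col "original_name")
  let stripped := (PySem.Chars.splitOn (PySem.Chars.strip ((pvGet col "value_description").getD "").toList) ['\n']).map PySem.Chars.strip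
  let bullets := (stripped.filter (fun l => l ≠ [])).map (fun l => "- ".toList ++ l)
  ["### ".toList ++ display, []] ++ bullets ++ [[]]

def generate_markdown_alt (table_name : String) (database_name : String) (columns : List (List (String × Option String))) : String :=
  let header : List (List Char) :=
    ["# Table: ".toList ++ table_name.toList, [],
     "**Database**: ".toList ++ database_name.toList, [],
     "## Columns".toList, [],
     "| Column | Alias | Type | Description |".toList,
     "|--------|-------|------|-------------|".toList]
  let lines := header ++ columns.map pvRowB
  let lines' := if columns.any pvQualB then
      lines ++ ([[], "## Business Logic & Value Descriptions".toList, []] ++ (columns.filter pvQualB).flatMap pvSectionB)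
    else lines
  String.ofList (PySem.Chars.join ['\n'] lines')

-- ===== PRECONDITION & SPEC =====
-- Pre_ excludes exactly the columns dicts missing one of the five keys A subscripts (Python raises KeyError there)
def Pre_generate_markdown (table_name : String) (database_name : String) (columns : List (List (String × Option String))) : Prop :=
  (columns.all (fun col =>
    let d := PySem.Dict.ofList col
    d.contains "original_name" && d.contains "column_name" && d.contains "data_type" &&
      d.contains "description" && d.contains "value_description")) = true

instance (table_name : String) (database_name : String) (columns : List (List (String × Option String))) : Decidable (Pre_generate_markdown table_name database_name columns) := by unfold Pre_generate_markdown; infer_instance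

def pvWitness_generate_markdown : String × String × (List (List (String × Option String))) :=
  ("users", "mydb",
   [[("original_name", some "id"), ("column_name", some "user|id"), ("data_type", some "int"),
     ("description", none), ("value_description", some " 1 means active \n2 means banned\n")],
    [("original_name", some "name"), ("column_name", none), ("data_type", none),
     ("description", some "the name"), ("value_description", some "NOT USEFUL")]])

def Spec_generate_markdown (table_name : String) (database_name : String) (columns : List (List (String × Option String))) (out : String) : Prop := out = generate_markdown_alt table_name database_name columns
instance (table_name : String) (database_name : String) (columns : List (List (String × Option String))) (out : String) : Decidable (Spec_generate_markdown table_name database_name columns out) := by unfold Spec_generate_markdown; infer_instance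

-- ===== CLAIM (what is proved, stated in full; the proofs are below) =====
def Claim_equal_generate_markdown : Prop := ∀ (table_name : String) (database_name : String) (columns : List (List (String × Option String))), Dom_generate_markdown table_name database_name columns → Pre_generate_markdown table_name database_name columns → Spec_generate_markdown table_name database_name columns (generate_markdown table_name database_name columns)

-- ===== LEMMAS AND PROOFS =====

-- the business_logic item A records for a qualifying column (display name, raw logic text)
def pvItem (col : List (String × Option String)) : List Char × List Char :=
  ((if pvAliasB col ≠ [] then pvShow (pvGet col "original_name") ++ " (".toList ++ pvAliasB col ++ [')'] else pvShow (pvGet col "original_name")),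
   ((pvGet col "value_description").getD "").toList)

-- the section genABizLoop emits for one item
def pvItemSection (item : List Char × List Char) : List (List Char) :=
  ["### ".toList ++ item.1, []] ++
    (((PySem.Chars.splitOn (PySem.Chars.strip item.2) ['\n']).map PySem.Chars.strip).filter (fun l => l ≠ [])).map (fun l => "- ".toList ++ l) ++ [[]]

theorem foldl_bullets (L : List (List Char)) (acc : List (List Char)) (pre : List Char) :
    L.foldl (fun ls ll => let llS := PySem.Chars.strip ll; if llS ≠ [] then ls ++ [pre ++ llS] else ls) acc
      = acc ++ ((L.map PySem.Chars.strip).filter (fun l => l ≠ [])).map (fun l => pre ++ l) := by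
  induction L generalizing acc with
  | nil => simp
  | cons h t ih =>
    rw [List.foldl_cons, ih]
    by_cases hs : PySem.Chars.strip h = [] <;> simp [hs]

theorem genALoop_eq (cols : List (List (String × Option String))) (lines : List (List Char)) (bl : List (List Char × List Char)) :
    genALoop cols lines bl = (lines ++ cols.map pvRowB, bl ++ (cols.filter pvQualB).map pvItem) := by
  induction cols generalizing lines bl with
  | nil => simp [genALoop]
  | cons col rest ih =>
    simp only [genALoop, ih, List.map_cons, List.filter_cons]
    by_cases hq : pvQualB col = true
    · have hq' := hq
      unfold pvQualB at hq'
      simp only [Bool.and_eq_true, Bool.not_eq_true'] at hq'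
      have h2 : PySem.Chars.isIn ['N', 'O', 'T', ' ', 'U', 'S', 'E', 'F', 'U', 'L'] (PySem.Chars.upper ((pvGet col "value_description").getD "").toList) = false := hq'.2
      simp [pvRowB, pvAliasB, pvItem, hq, hq'.1, h2, List.append_assoc]
    · have hq' := hq
      unfold pvQualB at hq'
      simp only [Bool.not_eq_true] at hq
      simp [pvRowB, pvAliasB, hq, List.append_assoc]
      intro ht
      simpa [ht] using hq'

theorem genABizLoop_eq (items : List (List Char × List Char)) (lines : List (List Char)) :
    genABizLoop items lines = lines ++ items.flatMap pvItemSection := by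
  induction items generalizing lines with
  | nil => simp [genABizLoop]
  | cons item rest ih =>
    simp only [genABizLoop, foldl_bullets, ih, List.flatMap_cons, pvItemSection]
    simp [List.append_assoc]

theorem section_eq (col : List (String × Option String)) : pvItemSection (pvItem col) = pvSectionB col := by
  simp [pvItemSection, pvItem, pvSectionB]

-- ===== VERDICT (by name: the statement is the Claim_ definition above) =====
theorem generate_markdown_spec : Claim_equal_generate_markdown := by
  intro tn dn cols _ _
  show generate_markdown tn dn cols = generate_markdown_alt tn dn cols
  unfold generate_markdown generate_markdown_alt
  simp only [genALoop_eq, List.nil_append]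
  by_cases hq : cols.any pvQualB
  · have hne : (cols.filter pvQualB).map pvItem ≠ [] := by
      simp only [ne_eq, List.map_eq_nil_iff, List.filter_eq_nil_iff]
      intro h
      rcases List.any_eq_true.1 hq with ⟨c, hc, hqc⟩
      exact absurd hqc (by simpa using h c hc)
    simp only [hq, hne, if_pos, ne_eq, not_false_iff, genABizLoop_eq]
    simp [List.flatMap_map, section_eq, List.append_assoc]
  · have hnil : (cols.filter pvQualB).map pvItem = [] := by
      simp only [List.map_eq_nil_iff, List.filter_eq_nil_iff]
      intro c hc
      by_contra hcq
      exact hq (List.any_eq_true.2 ⟨c, hc, by simpa using hcq⟩)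
    simp [hq, hnil]
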